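-- pv_equiv track=rewrite | github.com/qjpike/AoC2020 | 2020_11.py | chk_left
-- ===== SOURCE A (Python) =====
-- def chk_left(field,curr,x_len):
--     if (curr)%x_len != 0:
--         if field[curr - 1] == "#":
--             return True
--         elif field[curr - 1 ] == "L":
--             return False
--         else:
--             return chk_left(field,curr-1,x_len)
--     else:
--         return False
-- ===== SOURCE B (Python) =====
-- def chk_left(field, curr, x_len):
--     # Closed-form decomposition: slice the row segment to the left of curr
--     # (down to the row start, the previous multiple of x_len) and scan it
--     # right-to-left for the first seat.
--     start = curr - curr % x_len
--     for c in reversed(field[start:curr]):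
--         if c == "#" or c == "L":
--             return c == "#"
--     return False
-- ===== Notes on version B (the rewrite author's own statement) =====
-- stated objective: alternative
-- what changed: Replaces A's step-by-step recursion with a closed-form decomposition: compute the row start as curr - curr % x_len, slice that row segment, and scan it right-to-left for the first seat character.
-- outside the precondition, e.g. on chk_left(['#'], 1, -2): A returns True, B returns False; on chk_left(['#', '.'], -1, 2): A returns True, B returns True
import Mathlib
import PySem

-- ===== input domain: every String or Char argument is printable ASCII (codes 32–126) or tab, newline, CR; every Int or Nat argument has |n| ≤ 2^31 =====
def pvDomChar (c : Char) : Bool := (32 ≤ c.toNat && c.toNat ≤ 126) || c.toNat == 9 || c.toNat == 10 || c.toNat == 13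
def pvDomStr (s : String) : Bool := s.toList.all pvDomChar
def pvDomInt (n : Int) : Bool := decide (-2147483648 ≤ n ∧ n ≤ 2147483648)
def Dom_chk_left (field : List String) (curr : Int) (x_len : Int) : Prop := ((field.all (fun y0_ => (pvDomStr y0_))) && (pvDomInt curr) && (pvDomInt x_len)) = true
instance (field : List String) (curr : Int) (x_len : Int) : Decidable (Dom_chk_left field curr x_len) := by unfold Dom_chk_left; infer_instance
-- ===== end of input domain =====

-- B replaces A's cell-by-cell recursion by slicing the row segment left of curr and scanning it right-to-left (alternative decomposition, same cost).


-- ===== PORT A =====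
-- A's recursion, fuel-bounded to make it total (inside Pre_ the fuel curr.toNat + 1 always suffices).
def chk_leftAux (field : List String) (x_len : Int) : Nat → Int → Bool
  | 0, _ => false
  | n + 1, curr =>
    if PySem.Int.mod curr x_len ≠ 0 then
      match PySem.List.pyGet? field (curr - 1) with
      | none => false   -- Python raises IndexError here; excluded by Pre_
      | some c => if c = "#" then true else if c = "L" then false else chk_leftAux field x_len n (curr - 1)
    else false

def chk_left (field : List String) (curr : Int) (x_len : Int) : Bool :=
  chk_leftAux field x_len (curr.toNat + 1) curr

-- ===== PORT B =====
-- the for-loop of Source B over the reversed slice, with its early returns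
def altScan : List String → Bool
  | [] => false
  | c :: rest => if c = "#" || c = "L" then c = "#" else altScan rest

def chk_left_alt (field : List String) (curr : Int) (x_len : Int) : Bool :=
  let start := curr - PySem.Int.mod curr x_len
  altScan ((PySem.List.slice field (some start) (some curr)).reverse)

-- ===== PRECONDITION & SPEC =====
-- Pre_ restricts to the natural domain: a positive row width x_len and curr in [0, len(field)]
-- (or curr an exact multiple of x_len, where neither program touches the list). Outside it A
-- either raises (x_len = 0 → ZeroDivisionError, out-of-range walks → IndexError) or returns via
-- Python's accidental negative-index wraparound / floor-mod on a negative x_len.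
def Pre_chk_left (field : List String) (curr : Int) (x_len : Int) : Prop :=
  x_len ≠ 0 ∧ (x_len ∣ curr ∨ (0 < x_len ∧ 0 ≤ curr ∧ curr ≤ (field.length : Int)))
instance (field : List String) (curr : Int) (x_len : Int) : Decidable (Pre_chk_left field curr x_len) := by unfold Pre_chk_left; infer_instance
def pvWitness_chk_left : List String × Int × Int := (["L", "#", "."], 2, 3)

def Spec_chk_left (field : List String) (curr : Int) (x_len : Int) (out : Bool) : Prop := out = chk_left_alt field curr x_len
instance (field : List String) (curr : Int) (x_len : Int) (out : Bool) : Decidable (Spec_chk_left field curr x_len out) := by unfold Spec_chk_left; infer_instance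

-- ===== CLAIM (what is proved, stated in full; the proofs are below) =====
def Claim_equal_chk_left : Prop := ∀ (field : List String) (curr : Int) (x_len : Int), Dom_chk_left field curr x_len → Pre_chk_left field curr x_len → Spec_chk_left field curr x_len (chk_left field curr x_len)

-- ===== LEMMAS AND PROOFS =====

-- Both programs return False when curr is on the row boundary (mod = 0): the slice is empty.
lemma slice_self_nil (field : List String) (a : Int) :
    PySem.List.slice field (some a) (some a) = [] := by
  have h := PySem.List.length_slice field a a
  simp at h
  exact h

-- The walk: starting m < x_len cells to the right of a row boundary s, A's recursion equals
-- B's right-to-left scan of the slice field[s : s+m].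
lemma walk (field : List String) (x_len : Int) (hx : 0 < x_len) :
    ∀ (m f s : Nat), m < f → (x_len ∣ (s : Int)) → s + m ≤ field.length → ((m : Int) < x_len) →
      chk_leftAux field x_len f ((s : Int) + (m : Int)) =
        altScan ((PySem.List.slice field (some (s : Int)) (some ((s : Int) + (m : Int)))).reverse) := by
  intro m
  induction m with
  | zero =>
    intro f s hf hdvd _ _
    obtain ⟨f', rfl⟩ : ∃ f', f = f' + 1 := ⟨f - 1, by omega⟩
    have hmod : PySem.Int.mod (s : Int) x_len = 0 :=
      (PySem.Int.mod_eq_zero_iff_dvd (s : Int) x_len).mpr hdvd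
    simp [chk_leftAux, hmod, slice_self_nil, altScan]
  | succ m ih =>
    intro f s hf hdvd hlen hm
    obtain ⟨f', rfl⟩ : ∃ f', f = f' + 1 := ⟨f - 1, by omega⟩
    obtain ⟨q, hq⟩ := hdvd
    have hmod : PySem.Int.mod ((s : Int) + ((m + 1 : Nat) : Int)) x_len = ((m + 1 : Nat) : Int) := by
      rw [PySem.Int.mod_eq_emod_of_pos hx, hq, add_comm (x_len * q), Int.add_mul_emod_self_left]
      exact Int.emod_eq_of_lt (by push_cast; omega) hm
    have hmodne : PySem.Int.mod ((s : Int) + ((m + 1 : Nat) : Int)) x_len ≠ 0 := by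
      rw [hmod]; push_cast; omega
    have hsm : s + m < field.length := by omega
    have hget : PySem.List.pyGet? field ((s : Int) + ((m + 1 : Nat) : Int) - 1) = some field[s + m] := by
      have h : (s : Int) + ((m + 1 : Nat) : Int) - 1 = ((s + m : Nat) : Int) := by push_cast; ring
      rw [h, PySem.List.pyGet?_natCast]
      simp [hsm]
    have hslice : PySem.List.slice field (some (s : Int)) (some ((s : Int) + ((m + 1 : Nat) : Int))) =
        PySem.List.slice field (some (s : Int)) (some ((s : Int) + ((m : Nat) : Int))) ++ [field[s + m]] := by
      rw [PySem.List.slice_natCast_add field s (m + 1), PySem.List.slice_natCast_add field s m,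
        List.take_add_one]
      have h : (field.drop s)[m]? = some field[s + m] := by
        rw [List.getElem?_drop]
        simp [hsm]
      simp [h]
    have hrec : (s : Int) + ((m + 1 : Nat) : Int) - 1 = (s : Int) + ((m : Nat) : Int) := by
      push_cast; ring
    have hih := ih f' s (by omega) ⟨q, hq⟩ (by omega) (by push_cast at hm ⊢; omega)
    simp only [chk_leftAux]
    rw [if_pos hmodne, hget, hslice]
    simp only [List.reverse_append, List.reverse_cons, List.reverse_nil, List.nil_append,
      List.singleton_append, altScan]
    rw [hrec, hih]
    by_cases h1 : field[s + m] = "#"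
    · simp [h1]
    · by_cases h2 : field[s + m] = "L" <;> simp [h1, h2]

-- ===== VERDICT (by name: the statement is the Claim_ definition above) =====
theorem chk_left_spec : Claim_equal_chk_left := by
  unfold Claim_equal_chk_left
  intro field curr x_len _ hpre
  unfold Spec_chk_left chk_left chk_left_alt
  obtain ⟨hx0, hpre⟩ := hpre
  by_cases hdvd : x_len ∣ curr
  · have hmod : PySem.Int.mod curr x_len = 0 := (PySem.Int.mod_eq_zero_iff_dvd curr x_len).mpr hdvd
    simp [chk_leftAux, hmod, slice_self_nil, altScan]
  · rcases hpre with hdvd' | ⟨hx, hc0, hclen⟩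
    · exact absurd hdvd' hdvd
    have hmodpos : 0 < PySem.Int.mod curr x_len := by
      rcases lt_or_eq_of_le (PySem.Int.mod_nonneg curr hx) with h | h
      · exact h
      · exact absurd ((PySem.Int.mod_eq_zero_iff_dvd curr x_len).mp h.symm) hdvd
    have hmodlt : PySem.Int.mod curr x_len < x_len := PySem.Int.mod_lt curr hx
    have hstart : curr - PySem.Int.mod curr x_len = PySem.Int.floordiv curr x_len * x_len := by
      have := PySem.Int.floordiv_mul_add_mod curr x_len
      omega
    have hq0 : 0 ≤ PySem.Int.floordiv curr x_len := by
      rw [PySem.Int.floordiv_eq_ediv_of_pos hx]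
      exact Int.ediv_nonneg hc0 (le_of_lt hx)
    have hs0 : 0 ≤ curr - PySem.Int.mod curr x_len := by
      rw [hstart]; positivity
    set m : Nat := (PySem.Int.mod curr x_len).toNat with hm
    set s : Nat := (curr - PySem.Int.mod curr x_len).toNat with hs
    have hcurr : curr = (s : Int) + (m : Int) := by omega
    have hdvds : x_len ∣ (s : Int) := by
      refine ⟨PySem.Int.floordiv curr x_len, ?_⟩
      have : ((s : Nat) : Int) = curr - PySem.Int.mod curr x_len := by omega
      rw [this, hstart]; ring
    have hsv : curr - PySem.Int.mod curr x_len = (s : Int) := by omega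
    have hw := walk field x_len hx m (((s : Int) + (m : Int)).toNat + 1) s (by omega) hdvds
      (by omega) (by omega)
    rw [hsv, hcurr]
    exact hw
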